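-- pv_equiv track=rewrite | github.com/ewdlop/NLPNote | SupernaturalNLP.py | _multiply_indices
-- ===== SOURCE A (Python) =====
-- from typing import List, Dict, Tuple, Any, Optional, Union
--
-- def _multiply_indices(indices1: Tuple[int, ...], indices2: Tuple[int, ...]) -> Tuple[Optional[Tuple[int, ...]], int]:
--     """
--     Multiply two sets of fermionic indices with proper anti-commutation.
--
--     Returns:
--         (combined_indices, sign) or (None, 0) if result is zero
--     """
--     combined = list(indices1) + list(indices2)
--     sign = 1
--
--     # Apply anti-commutation relations
--     i = 0
--     while i < len(combined):
--         # Check for θᵢ² = 0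
--         if combined.count(combined[i]) > 1:
--             return None, 0
--         i += 1
--
--     # Calculate sign from anti-commutations needed to sort
--     for i in range(len(combined)):
--         for j in range(i + 1, len(combined)):
--             if combined[i] > combined[j]:
--                 combined[i], combined[j] = combined[j], combined[i]
--                 sign *= -1
--
--     return tuple(combined), sign
-- ===== SOURCE B (Python) =====
-- from typing import Tuple, Optional
--
--
-- def _multiply_indices(indices1: Tuple[int, ...], indices2: Tuple[int, ...]) -> Tuple[Optional[Tuple[int, ...]], int]:
--     """Combine fermionic indices: zero on a repeated index, otherwise the
--     sorted indices with sign = parity of inversions (anti-commutation).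
--
--     Duplicate check via a set; sign via merge-sort inversion counting
--     instead of the swap-by-swap exchange-sort simulation."""
--     combined = list(indices1) + list(indices2)
--     if len(set(combined)) != len(combined):
--         return None, 0
--
--     def msort(l):
--         if len(l) <= 1:
--             return l, 0
--         mid = len(l) // 2
--         ls, c1 = msort(l[:mid])
--         rs, c2 = msort(l[mid:])
--         merged = []
--         c = 0
--         i = j = 0
--         while i < len(ls) and j < len(rs):
--             if ls[i] <= rs[j]:
--                 merged.append(ls[i])
--                 i += 1
--             else:
--                 merged.append(rs[j])
--                 j += 1
--                 c += len(ls) - i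
--         merged.extend(ls[i:])
--         merged.extend(rs[j:])
--         return merged, c1 + c2 + c
--
--     s, inv = msort(combined)
--     return tuple(s), 1 if inv % 2 == 0 else -1
-- ===== Notes on version B (the rewrite author's own statement) =====
-- stated objective: alternative
-- what changed: Replaced the count-based O(n^2) duplicate scan with a set-size check and the O(n^2) exchange sort with sign flipping by a merge sort that counts inversions, taking the sign from the inversion parity.
import Mathlib
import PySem

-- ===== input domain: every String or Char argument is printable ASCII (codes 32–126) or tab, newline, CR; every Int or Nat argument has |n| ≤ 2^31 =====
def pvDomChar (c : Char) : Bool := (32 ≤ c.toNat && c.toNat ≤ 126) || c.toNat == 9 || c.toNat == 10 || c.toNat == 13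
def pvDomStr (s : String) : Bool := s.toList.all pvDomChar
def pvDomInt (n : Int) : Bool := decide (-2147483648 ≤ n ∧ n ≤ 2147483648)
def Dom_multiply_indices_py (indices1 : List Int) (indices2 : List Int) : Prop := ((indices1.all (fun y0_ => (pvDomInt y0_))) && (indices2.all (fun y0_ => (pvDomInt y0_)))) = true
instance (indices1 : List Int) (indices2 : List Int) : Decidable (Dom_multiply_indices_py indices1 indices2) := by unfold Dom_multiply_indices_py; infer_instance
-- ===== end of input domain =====

-- B replaces A's quadratic count-based duplicate scan and sign-flipping exchange sort by a
-- set-size duplicate check and a merge sort counting inversions (sign = inversion parity).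

-- ===== PORT A =====
-- A's `while` duplicate scan: walk the list, checking each element's count in the FULL list.
def hasDupA (full : List Int) : List Int → Bool
  | [] => false
  | x :: t => if 1 < full.count x then true else hasDupA full t

-- A's inner `for j` loop on the suffix starting at position i: current value at slot i is `h`;
-- whenever h > y they swap (h moves into y's slot, y becomes the value at slot i), sign *= -1.
-- Returns (final value at slot i, rest of the suffix, sign factor of this pass).
def passA (h : Int) : List Int → Int × List Int × Int
  | [] => (h, [], 1)
  | y :: t =>
    if h > y then
      let p := passA y t
      (p.1, h :: p.2.1, p.2.2 * (-1))
    else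
      let p := passA h t
      (p.1, y :: p.2.1, p.2.2)

theorem passA_len (h : Int) (t : List Int) : (passA h t).2.1.length = t.length := by
  induction t generalizing h with
  | nil => rfl
  | cons y t ih =>
    simp only [passA]
    split <;> simp [ih]

-- A's outer `for i` loop: fix slot i, then continue on the remaining suffix.
def sortA : List Int → List Int × Int
  | [] => ([], 1)
  | h :: t =>
    let p := passA h t
    let q := sortA p.2.1
    (p.1 :: q.1, p.2.2 * q.2)
termination_by l => l.length
decreasing_by simp [passA_len]

def multiply_indices_py (indices1 : List Int) (indices2 : List Int) : Option (List Int) × Int :=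
  let combined := indices1 ++ indices2
  if hasDupA combined combined then (none, 0)
  else
    let p := sortA combined
    (some p.1, p.2)

-- ===== PORT B =====
-- B's merge loop: merge two runs, adding len(ls)-i cross inversions each time a right element
-- is taken.
def mergeB : List Int → List Int → List Int × Nat
  | [], r => (r, 0)
  | l, [] => (l, 0)
  | x :: l, y :: r =>
    if x ≤ y then
      let p := mergeB l (y :: r)
      (x :: p.1, p.2)
    else
      let p := mergeB (x :: l) r
      (y :: p.1, p.2 + (x :: l).length)

-- B's msort: split in half, sort both halves, merge counting inversions.
def msortB (l : List Int) : List Int × Nat :=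
  if l.length ≤ 1 then (l, 0)
  else
    let mid := l.length / 2
    let p1 := msortB (l.take mid)
    let p2 := msortB (l.drop mid)
    let p := mergeB p1.1 p2.1
    (p.1, p1.2 + p2.2 + p.2)
termination_by l.length
decreasing_by
  · simp only [List.length_take]; omega
  · simp only [List.length_drop]; omega

def multiply_indices_py_alt (indices1 : List Int) (indices2 : List Int) : Option (List Int) × Int :=
  let combined := indices1 ++ indices2
  if (PySem.Set.ofList combined).length ≠ combined.length then (none, 0)
  else
    let p := msortB combined
    (some p.1, if p.2 % 2 = 0 then 1 else -1)

-- ===== PRECONDITION & SPEC =====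
def Spec_multiply_indices_py (indices1 : List Int) (indices2 : List Int) (out : Option (List Int) × Int) : Prop := out = multiply_indices_py_alt indices1 indices2
instance (indices1 : List Int) (indices2 : List Int) (out : Option (List Int) × Int) : Decidable (Spec_multiply_indices_py indices1 indices2 out) := by unfold Spec_multiply_indices_py; infer_instance

-- ===== CLAIM (what is proved, stated in full; the proofs are below) =====
def Claim_equal_multiply_indices_py : Prop := ∀ (indices1 : List Int) (indices2 : List Int), Dom_multiply_indices_py indices1 indices2 → Spec_multiply_indices_py indices1 indices2 (multiply_indices_py indices1 indices2)

-- ===== LEMMAS AND PROOFS =====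

-- number of inversions of a list
def invCount : List Int → Nat
  | [] => 0
  | x :: t => t.countP (fun y => decide (y < x)) + invCount t

-- cross inversions between two lists
def crossInv (l r : List Int) : Nat := (l.map (fun x => r.countP (fun y => decide (y < x)))).sum

theorem hasDupA_iff (full : List Int) (t : List Int) :
    hasDupA full t = true ↔ ∃ x ∈ t, 1 < full.count x := by
  induction t with
  | nil => simp [hasDupA]
  | cons x t ih =>
    simp only [hasDupA]
    split <;> simp_all

theorem hasDupA_self_iff (l : List Int) : hasDupA l l = true ↔ ¬ l.Nodup := by
  rw [hasDupA_iff, List.nodup_iff_count_le_one]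
  constructor
  · rintro ⟨x, _, h⟩ hall
    exact absurd (hall x) (by omega)
  · intro h
    rcases not_forall.mp h with ⟨x, hx⟩
    exact ⟨x, List.count_pos_iff.mp (by omega), by omega⟩

theorem ofList_length_eq_iff (l : List Int) :
    (PySem.Set.ofList l).length = l.length ↔ l.Nodup := by
  have hperm : (PySem.Set.ofList l).Perm l.dedup :=
    (List.perm_ext_iff_of_nodup (PySem.Set.nodup_ofList l) l.nodup_dedup).mpr
      (fun a => by rw [PySem.Set.mem_ofList, List.mem_dedup])
  rw [hperm.length_eq]
  constructor
  · intro h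
    rw [← List.dedup_eq_self (l := l)]
    exact (List.dedup_sublist l).eq_of_length h
  · intro h; rw [List.dedup_eq_self.mpr h]

-- One pass of A's exchange sort on a duplicate-free suffix: the result is a permutation with
-- the minimum moved to the front, and the pass's sign factor is the change of inversion parity.
theorem passA_spec (h : Int) (t : List Int) (hnd : (h :: t).Nodup) :
    ((passA h t).1 :: (passA h t).2.1).Perm (h :: t) ∧
    (∀ z ∈ h :: t, (passA h t).1 ≤ z) ∧
    (passA h t).2.2 * (-1 : Int) ^ invCount ((passA h t).1 :: (passA h t).2.1)
      = (-1 : Int) ^ invCount (h :: t) := by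
  induction t generalizing h with
  | nil => simp [passA, invCount]
  | cons y t ih =>
    by_cases hgt : h > y
    · have hnd' : (y :: t).Nodup := hnd.sublist (by simp)
      obtain ⟨hp, hm, hs⟩ := ih y hnd'
      simp only [passA, if_pos hgt]
      rcases hPE : passA y t with ⟨m, r, s⟩
      simp only [hPE] at hp hm hs ⊢
      have hmy : m ≤ y := hm y (by simp)
      have hmh : m ≤ h := le_of_lt (lt_of_le_of_lt hmy hgt)
      have hmr : ∀ z ∈ r, m ≤ z := fun z hz => hm z (hp.mem_iff.mp (by simp [hz]))
      refine ⟨?_, ?_, ?_⟩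
      · exact (List.Perm.swap h m r).trans (hp.cons h)
      · intro z hz
        rcases List.mem_cons.mp hz with rfl | hz
        · exact hmh
        · exact hm z hz
      · have hc0 : r.countP (fun z => decide (z < m)) = 0 :=
          List.countP_eq_zero.mpr (fun z hz => by simpa using hmr z hz)
        have hch : r.countP (fun z => decide (z < h)) = t.countP (fun z => decide (z < h)) := by
          have := hp.countP_eq (fun z => decide (z < h))
          simp only [List.countP_cons, decide_eq_true_eq] at this
          have h1 : m < h := lt_of_le_of_lt hmy hgt
          simp only [h1, hgt, if_pos] at this
          omega
        have e1 : invCount (m :: h :: r) = t.countP (fun z => decide (z < h)) + invCount (m :: r) := by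
          have h2 : ¬ (h < m) := not_lt.mpr hmh
          simp [invCount, h2, hc0, hch]
        have e2 : invCount (h :: y :: t)
            = 1 + t.countP (fun z => decide (z < h)) + invCount (y :: t) := by
          have h2 : y < h := hgt
          simp [invCount, h2]
          omega
        rw [e1, e2, pow_add, pow_add, ← hs]
        ring
    · have hne : h ≠ y := by rintro rfl; simp at hnd
      have hlt : h < y := lt_of_le_of_ne (not_lt.mp hgt) hne
      have hnd' : (h :: t).Nodup :=
        hnd.sublist (List.cons_sublist_cons.mpr (List.sublist_cons_self y t))
      obtain ⟨hp, hm, hs⟩ := ih h hnd'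
      simp only [passA, if_neg hgt]
      rcases hPE : passA h t with ⟨m, r, s⟩
      simp only [hPE] at hp hm hs ⊢
      have hmh : m ≤ h := hm h (by simp)
      have hmy : m ≤ y := le_of_lt (lt_of_le_of_lt hmh hlt)
      have hmr : ∀ z ∈ r, m ≤ z := fun z hz => hm z (hp.mem_iff.mp (by simp [hz]))
      refine ⟨?_, ?_, ?_⟩
      · exact (List.Perm.swap y m r).trans ((hp.cons y).trans (List.Perm.swap h y t))
      · intro z hz
        rcases List.mem_cons.mp hz with rfl | hz
        · exact hmh
        · rcases List.mem_cons.mp hz with rfl | hz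
          · exact hmy
          · exact hm z (by simp [hz])
      · have hc0 : r.countP (fun z => decide (z < m)) = 0 :=
          List.countP_eq_zero.mpr (fun z hz => by simpa using hmr z hz)
        have hcy : r.countP (fun z => decide (z < y)) = t.countP (fun z => decide (z < y)) := by
          have := hp.countP_eq (fun z => decide (z < y))
          simp only [List.countP_cons, decide_eq_true_eq] at this
          have h1 : m < y := lt_of_le_of_lt hmh hlt
          simp only [h1, hlt, if_pos] at this
          omega
        have e1 : invCount (m :: y :: r) = t.countP (fun z => decide (z < y)) + invCount (m :: r) := by
          have h2 : ¬ (y < m) := not_lt.mpr hmy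
          simp [invCount, h2, hc0, hcy]
        have e2 : invCount (h :: y :: t)
            = t.countP (fun z => decide (z < y)) + invCount (h :: t) := by
          have h2 : ¬ (y < h) := not_lt.mpr hlt.le
          simp [invCount, h2]
          omega
        rw [e1, e2, pow_add, pow_add, ← hs]
        ring

-- A's full exchange sort on a duplicate-free list: sorted permutation, sign = inversion parity.
theorem sortA_spec (l : List Int) (hnd : l.Nodup) :
    (sortA l).1.Perm l ∧ (sortA l).1.Pairwise (· ≤ ·) ∧
    (sortA l).2 = (-1 : Int) ^ invCount l := by
  induction l using sortA.induct with
  | case1 => simp [sortA, invCount]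
  | case2 h t p ih =>
    obtain ⟨hp, hm, hs⟩ := passA_spec h t hnd
    have hndmr : ((passA h t).1 :: (passA h t).2.1).Nodup := hp.nodup_iff.mpr hnd
    have hndr : (passA h t).2.1.Nodup := (List.nodup_cons.mp hndmr).2
    obtain ⟨hsp, hss, hsc⟩ := ih hndr
    have hunf : sortA (h :: t) = ((passA h t).1 :: (sortA (passA h t).2.1).1,
        (passA h t).2.2 * (sortA (passA h t).2.1).2) := by
      rw [sortA]
    rw [hunf]
    have hmr : ∀ z ∈ (passA h t).2.1, (passA h t).1 ≤ z :=
      fun z hz => hm z (hp.mem_iff.mp (by simp [hz]))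
    refine ⟨(hsp.cons _).trans hp, ?_, ?_⟩
    · rw [List.pairwise_cons]
      exact ⟨fun z hz => hmr z (hsp.mem_iff.mp hz), hss⟩
    · have hc0 : (passA h t).2.1.countP (fun z => decide (z < (passA h t).1)) = 0 :=
        List.countP_eq_zero.mpr (fun z hz => by simpa using hmr z hz)
      have : invCount ((passA h t).1 :: (passA h t).2.1) = invCount (passA h t).2.1 := by
        simp [invCount, hc0]
      rw [hsc, ← hs, this]

theorem crossInv_nil_left (r : List Int) : crossInv [] r = 0 := rfl

theorem crossInv_cons_left (x : Int) (l r : List Int) :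
    crossInv (x :: l) r = r.countP (fun y => decide (y < x)) + crossInv l r := by
  simp [crossInv]

theorem crossInv_cons_right (l : List Int) (y : Int) (r : List Int) :
    crossInv l (y :: r) = l.countP (fun x => decide (y < x)) + crossInv l r := by
  induction l with
  | nil => simp [crossInv]
  | cons a l ih =>
    simp only [crossInv_cons_left, ih, List.countP_cons]
    split_ifs <;> omega

theorem crossInv_perm {l l' r r' : List Int} (hl : l.Perm l') (hr : r.Perm r') :
    crossInv l r = crossInv l' r' := by
  unfold crossInv
  have h1 : (l.map (fun x => r.countP (fun y => decide (y < x))))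
      = l.map (fun x => r'.countP (fun y => decide (y < x))) :=
    List.map_congr_left (fun x _ => hr.countP_eq _)
  rw [h1]
  exact (hl.map _).sum_eq

theorem invCount_append (l r : List Int) :
    invCount (l ++ r) = invCount l + invCount r + crossInv l r := by
  induction l with
  | nil => simp [invCount, crossInv_nil_left]
  | cons x l ih =>
    simp only [List.cons_append, invCount, ih, List.countP_append, crossInv_cons_left]
    omega

-- B's merge on two sorted runs: sorted permutation of the concatenation, counter = cross inversions.
theorem mergeB_spec (l r : List Int) (hl : l.Pairwise (· ≤ ·)) (hr : r.Pairwise (· ≤ ·)) :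
    (mergeB l r).1.Perm (l ++ r) ∧ (mergeB l r).1.Pairwise (· ≤ ·) ∧
    (mergeB l r).2 = crossInv l r := by
  induction l, r using mergeB.induct with
  | case1 r => simpa [mergeB, crossInv] using hr
  | case2 l hne =>
    rcases l with _ | ⟨x, l⟩
    · simp at hne
    · simpa [mergeB, crossInv] using hl
  | case3 x l y r hle ih =>
    obtain ⟨ihp, ihs, ihc⟩ := ih (List.pairwise_cons.mp hl).2 hr
    simp only [mergeB, if_pos hle]
    refine ⟨ihp.cons x, ?_, ?_⟩
    · rw [List.pairwise_cons]
      refine ⟨?_, ihs⟩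
      intro z hz
      have hz' : z ∈ l ++ y :: r := ihp.mem_iff.mp hz
      rcases List.mem_append.mp hz' with h1 | h1
      · exact (List.pairwise_cons.mp hl).1 z h1
      · rcases List.mem_cons.mp h1 with rfl | h1
        · exact hle
        · exact le_trans hle ((List.pairwise_cons.mp hr).1 z h1)
    · rw [ihc, crossInv_cons_left]
      have : (y :: r).countP (fun z => decide (z < x)) = 0 :=
        List.countP_eq_zero.mpr (by
          intro z hz
          simp only [decide_eq_true_eq, not_lt]
          rcases List.mem_cons.mp hz with rfl | hz
          · exact hle
          · exact le_trans hle ((List.pairwise_cons.mp hr).1 z hz))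
      omega
  | case4 x l y r hle ih =>
    obtain ⟨ihp, ihs, ihc⟩ := ih hl (List.pairwise_cons.mp hr).2
    have hyx : y < x := not_le.mp hle
    simp only [mergeB, if_neg hle]
    refine ⟨?_, ?_, ?_⟩
    · exact (ihp.cons y).trans (List.perm_middle).symm
    · rw [List.pairwise_cons]
      refine ⟨?_, ihs⟩
      intro z hz
      have hz' : z ∈ (x :: l) ++ r := ihp.mem_iff.mp hz
      rcases List.mem_append.mp hz' with h1 | h1
      · rcases List.mem_cons.mp h1 with rfl | h1
        · exact hyx.le
        · exact le_trans hyx.le ((List.pairwise_cons.mp hl).1 z h1)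
      · exact (List.pairwise_cons.mp hr).1 z h1
    · rw [ihc, crossInv_cons_right]
      have : (x :: l).countP (fun z => decide (y < z)) = (x :: l).length :=
        List.countP_eq_length.mpr (by
          intro z hz
          simp only [decide_eq_true_eq]
          rcases List.mem_cons.mp hz with rfl | hz
          · exact hyx
          · exact lt_of_lt_of_le hyx ((List.pairwise_cons.mp hl).1 z hz))
      omega

-- B's merge sort: sorted permutation, counter = total number of inversions.
theorem msortB_spec (l : List Int) :
    (msortB l).1.Perm l ∧ (msortB l).1.Pairwise (· ≤ ·) ∧ (msortB l).2 = invCount l := by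
  induction l using msortB.induct with
  | case1 l hle =>
    rcases l with _ | ⟨a, _ | ⟨b, t⟩⟩
    · simp [msortB, invCount]
    · simp [msortB, invCount]
    · simp at hle
  | case2 l hgt mid ih1 ih2 =>
    obtain ⟨hp1p, hp1s, hp1c⟩ := ih1
    obtain ⟨hp2p, hp2s, hp2c⟩ := ih2
    obtain ⟨hmp, hms, hmc⟩ := mergeB_spec (msortB (l.take mid)).1 (msortB (l.drop mid)).1 hp1s hp2s
    have hunf : msortB l = ((mergeB (msortB (l.take mid)).1 (msortB (l.drop mid)).1).1,
        (msortB (l.take mid)).2 + (msortB (l.drop mid)).2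
          + (mergeB (msortB (l.take mid)).1 (msortB (l.drop mid)).1).2) := by
      rw [msortB]
      simp only [if_neg hgt]
      rfl
    rw [hunf]
    constructor
    · exact (hmp.trans (hp1p.append hp2p)).trans (by rw [List.take_append_drop])
    constructor
    · exact hms
    · rw [hmc, hp1c, hp2c]
      have := invCount_append (l.take mid) (l.drop mid)
      rw [List.take_append_drop] at this
      rw [this, crossInv_perm hp1p hp2p]

-- ===== VERDICT (by name: the statement is the Claim_ definition above) =====
theorem multiply_indices_py_spec : Claim_equal_multiply_indices_py := by
  intro indices1 indices2 _
  unfold Spec_multiply_indices_py multiply_indices_py multiply_indices_py_alt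
  set c := indices1 ++ indices2 with hc
  by_cases hnd : c.Nodup
  · rw [if_neg (by simpa [hasDupA_self_iff]), if_neg (by simp [ofList_length_eq_iff, hnd])]
    obtain ⟨hpA, hsA, hgA⟩ := sortA_spec c hnd
    obtain ⟨hpB, hsB, hgB⟩ := msortB_spec c
    have hlist : (sortA c).1 = (msortB c).1 :=
      (hpA.trans hpB.symm).eq_of_pairwise (fun _ _ _ _ h1 h2 => le_antisymm h1 h2) hsA hsB
    have hsign : (sortA c).2 = (if (msortB c).2 % 2 = 0 then (1:Int) else -1) := by
      rw [hgA, hgB]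
      rcases Nat.even_or_odd (invCount c) with he | ho
      · rw [if_pos (Nat.even_iff.mp he), he.neg_one_pow]
      · rw [if_neg (by simp [Nat.odd_iff.mp ho]), ho.neg_one_pow]
    simp [hlist, hsign]
  · rw [if_pos (by simpa [hasDupA_self_iff]), if_pos (by simp [ofList_length_eq_iff, hnd])]
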